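-- pv_equiv track=rewrite | github.com/chuckpoole-lab/poker-trainer | scripts/generate-ranges.py | _compress_pairs
-- ===== SOURCE A (Python) =====
-- RANKS = ['A','K','Q','J','T','9','8','7','6','5','4','3','2']
--
-- def _compress_pairs(pair_ranks):
--     """Compress a list of pair rank values into notation."""
--     parts = []
--     # Find continuous runs
--     runs = []
--     current_run = [pair_ranks[0]]
--     for i in range(1, len(pair_ranks)):
--         if pair_ranks[i] == current_run[-1] + 1:
--             current_run.append(pair_ranks[i])
--         else:
--             runs.append(current_run)
--             current_run = [pair_ranks[i]]
--     runs.append(current_run)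
--
--     for run in runs:
--         if len(run) == 1:
--             r = RANKS[14 - run[0]]
--             parts.append(f'{r}{r}')
--         elif run[-1] == 14:  # Goes up to AA
--             r = RANKS[14 - run[0]]
--             parts.append(f'{r}{r}+')
--         else:
--             lo = RANKS[14 - run[0]]
--             hi = RANKS[14 - run[-1]]
--             parts.append(f'{lo}{lo}-{hi}{hi}')
--     return parts
-- ===== SOURCE B (Python) =====
-- RANKS = ['A','K','Q','J','T','9','8','7','6','5','4','3','2']
--
-- def _compress_pairs(pair_ranks):
--     """Compress a list of pair rank values into notation (single pass, scalar run state)."""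
--     def fmt(start, last):
--         r = RANKS[14 - start]
--         if start == last:
--             return f'{r}{r}'
--         if last == 14:
--             return f'{r}{r}+'
--         hi = RANKS[14 - last]
--         return f'{r}{r}-{hi}{hi}'
--
--     parts = []
--     start = last = pair_ranks[0]
--     for x in pair_ranks[1:]:
--         if x == last + 1:
--             last = x
--         else:
--             parts.append(fmt(start, last))
--             start = last = x
--     parts.append(fmt(start, last))
--     return parts
-- ===== Notes on version B (the rewrite author's own statement) =====
-- stated objective: simpler
-- what changed: B fuses A's two phases (build a list of run-lists, then format them) into one pass that keeps only two scalars start/last and emits each run's notation inline.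
import Mathlib
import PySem

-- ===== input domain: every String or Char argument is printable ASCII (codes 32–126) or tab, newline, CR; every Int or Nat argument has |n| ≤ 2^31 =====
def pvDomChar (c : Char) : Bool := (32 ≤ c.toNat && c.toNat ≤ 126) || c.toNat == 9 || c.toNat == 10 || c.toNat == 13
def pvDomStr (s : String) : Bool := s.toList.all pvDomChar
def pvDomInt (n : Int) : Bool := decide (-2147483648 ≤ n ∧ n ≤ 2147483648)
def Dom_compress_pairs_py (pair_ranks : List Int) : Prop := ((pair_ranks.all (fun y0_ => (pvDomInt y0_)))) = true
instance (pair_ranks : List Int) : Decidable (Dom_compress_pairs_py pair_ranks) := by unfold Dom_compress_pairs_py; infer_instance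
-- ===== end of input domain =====

-- B fuses A's two phases (collect run-lists, then format) into one pass keeping only
-- two scalars start/last and emitting each run's notation inline; same output, simpler.


-- ===== PORT A =====
def pyRANKS : List String := ["A","K","Q","J","T","9","8","7","6","5","4","3","2"]

-- Python `RANKS[14 - r]`; pyGet? gives Python's negative-index wraparound,
-- and returns none (IndexError) outside Pre_, where the default "" is never used.
def rankStr (r : Int) : String := (PySem.List.pyGet? pyRANKS (14 - r)).getD ""

-- A's first loop: split into continuous runs (cur is nonempty by construction,
-- so getLastD 0 / headD 0 are Python's current_run[-1] / run[0]).
def runsAux (rest : List Int) (cur : List Int) : List (List Int) :=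
  match rest with
  | [] => [cur]
  | x :: xs =>
      if x = cur.getLastD 0 + 1 then runsAux xs (cur ++ [x])
      else cur :: runsAux xs [x]

-- A's second loop body: format one run.
def fmtRun (run : List Int) : String :=
  if run.length = 1 then
    let r := rankStr (run.headD 0); r ++ r
  else if run.getLastD 0 = 14 then
    let r := rankStr (run.headD 0); r ++ r ++ "+"
  else
    let lo := rankStr (run.headD 0)
    let hi := rankStr (run.getLastD 0)
    lo ++ lo ++ "-" ++ hi ++ hi

def compress_pairs_py (pair_ranks : List Int) : List String :=
  match pair_ranks with
  | [] => []   -- Python raises IndexError at pair_ranks[0]; excluded by Pre_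
  | x :: xs => (runsAux xs [x]).map fmtRun

-- ===== PORT B =====
-- B's fmt(start, last) helper.
def fmtB (start last : Int) : String :=
  let r := (PySem.List.pyGet? pyRANKS (14 - start)).getD ""
  if start = last then r ++ r
  else if last = 14 then r ++ r ++ "+"
  else
    let hi := (PySem.List.pyGet? pyRANKS (14 - last)).getD ""
    r ++ r ++ "-" ++ hi ++ hi

-- B's single loop over pair_ranks[1:] with scalar state (start, last).
def altAux (rest : List Int) (start last : Int) : List String :=
  match rest with
  | [] => [fmtB start last]
  | x :: xs =>
      if x = last + 1 then altAux xs start x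
      else fmtB start last :: altAux xs x x

def compress_pairs_py_alt (pair_ranks : List Int) : List String :=
  match pair_ranks with
  | [] => []   -- Source B raises IndexError at pair_ranks[0]; excluded by Pre_
  | x :: xs => altAux xs x x

-- ===== PRECONDITION & SPEC =====
-- Pre_ excludes exactly the inputs where Python A raises IndexError: the empty list
-- (pair_ranks[0]) and lists with an element outside 2..27, for which the accessed
-- RANKS[14 - r] index falls outside Python's valid range -13..12 (B raises there too).
def Pre_compress_pairs_py (pair_ranks : List Int) : Prop :=
  pair_ranks ≠ [] ∧ ∀ r ∈ pair_ranks, 2 ≤ r ∧ r ≤ 27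
instance (pair_ranks : List Int) : Decidable (Pre_compress_pairs_py pair_ranks) := by
  unfold Pre_compress_pairs_py; infer_instance

def pvWitness_compress_pairs_py : List Int := [5, 9, 10, 11]

def Spec_compress_pairs_py (pair_ranks : List Int) (out : List String) : Prop := out = compress_pairs_py_alt pair_ranks
instance (pair_ranks : List Int) (out : List String) : Decidable (Spec_compress_pairs_py pair_ranks out) := by unfold Spec_compress_pairs_py; infer_instance

-- ===== CLAIM (what is proved, stated in full; the proofs are below) =====
def Claim_equal_compress_pairs_py : Prop := ∀ (pair_ranks : List Int), Dom_compress_pairs_py pair_ranks → Pre_compress_pairs_py pair_ranks → Spec_compress_pairs_py pair_ranks (compress_pairs_py pair_ranks)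

-- ===== LEMMAS AND PROOFS =====
-- The consecutive run from s to l (A's current_run when B's state is (s, l)).
def runList (s l : Int) : List Int :=
  (List.range (l - s + 1).toNat).map (fun i => s + Int.ofNat i)

theorem runList_self (x : Int) : runList x x = [x] := by
  simp [runList]

theorem runList_snoc (s l : Int) (h : s ≤ l) :
    runList s l ++ [l + 1] = runList s (l + 1) := by
  unfold runList
  have h1 : (l + 1 - s + 1).toNat = (l - s + 1).toNat + 1 := by omega
  rw [h1, List.range_succ, List.map_append]
  simp
  omega

theorem headD_runList (s l : Int) (h : s ≤ l) : (runList s l).headD 0 = s := by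
  unfold runList
  have h1 : (l - s + 1).toNat = ((l - s).toNat) + 1 := by omega
  rw [h1, List.range_succ_eq_map]
  simp

theorem getLastD_runList (s l : Int) (h : s ≤ l) : (runList s l).getLastD 0 = l := by
  unfold runList
  have h1 : (l - s + 1).toNat = ((l - s).toNat) + 1 := by omega
  rw [h1, List.range_succ, List.map_append]
  simp
  omega

theorem length_runList (s l : Int) : (runList s l).length = (l - s + 1).toNat := by
  simp [runList]

theorem fmtRun_runList (s l : Int) (h : s ≤ l) : fmtRun (runList s l) = fmtB s l := by
  unfold fmtRun fmtB rankStr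
  rw [headD_runList s l h, getLastD_runList s l h, length_runList]
  by_cases hsl : s = l
  · subst hsl; simp
  · have h1 : (l - s + 1).toNat ≠ 1 := by omega
    simp [h1, hsl]

theorem main_aux : ∀ (rest : List Int) (s l : Int), s ≤ l →
    (runsAux rest (runList s l)).map fmtRun = altAux rest s l := by
  intro rest
  induction rest with
  | nil =>
      intro s l h
      simp [runsAux, altAux, fmtRun_runList s l h]
  | cons x xs ih =>
      intro s l h
      rw [runsAux, altAux, getLastD_runList s l h]
      by_cases hx : x = l + 1
      · rw [if_pos hx, if_pos hx, hx, runList_snoc s l h]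
        exact ih s (l + 1) (by omega)
      · rw [if_neg hx, if_neg hx, List.map_cons, fmtRun_runList s l h]
        rw [show [x] = runList x x from (runList_self x).symm]
        rw [ih x x le_rfl]

-- ===== VERDICT (by name: the statement is the Claim_ definition above) =====
theorem compress_pairs_py_spec : Claim_equal_compress_pairs_py := by
  intro pair_ranks _ _
  unfold Spec_compress_pairs_py
  cases pair_ranks with
  | nil => rfl
  | cons x xs =>
      show (runsAux xs [x]).map fmtRun = altAux xs x x
      rw [show [x] = runList x x from (runList_self x).symm, main_aux xs x x le_rfl]
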